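-- pv_equiv track=rewrite | github.com/EMZEDI/game_of_life | code_gem_ofLife.py | is_valid_universe
-- ===== SOURCE A (Python) =====
-- def is_valid_universe(my_2D_list):
--     """(list)-> bool
--     Given a 2D list (or a list) the function detects if its a valid universe based on the rules
--     given in the handout or not. It returns a boolean True if its a valid universe False otherwise.
--     >>> is_valid_universe([[1,2,3]])
--     False
--     >>> is_valid_universe([[1,0,0], [1,1]])
--     False
--     >>> is_valid_universe([[0,1], [0,1], [0,0]])
--     True
--     """
--     # checks type of sublists
--     for elem in my_2D_list:
--         if type(elem) != list:
--             return False
--     # checks if the outer list is empty or not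
--     if len(my_2D_list) == 0:
--         return False
--
--     # iterate through the outer list to check the conditons
--     for element in my_2D_list:
--         # checks if all the elementd are 0,1
--         if element.count(0) + element.count(1) == len(element):
--             continue
--         else:
--             return False
--
--     # iterates through the list to check if its rectangular or not
--     for i in range(len(my_2D_list)):
--         if len(my_2D_list) == 1 or i == len(my_2D_list) - 1: # checks if the length is one or
--             break                                            # reached the last index
--         # to check length of all sublists
--         elif len(my_2D_list[i]) == len(my_2D_list[i+1]):
--             continue
--         else:
--             return False
--
--     return True # if all the tests pass, it returns true
-- ===== SOURCE B (Python) =====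
-- def is_valid_universe(my_2D_list):
--     if len(my_2D_list) == 0:
--         return False
--     width = len(my_2D_list[0]) if type(my_2D_list[0]) == list else None
--     for row in my_2D_list:
--         if type(row) != list:
--             return False
--         if len(row) != width:
--             return False
--         if any(x != 0 and x != 1 for x in row):
--             return False
--     return True
-- ===== Notes on version B (the rewrite author's own statement) =====
-- stated objective: simpler
-- what changed: Replaces A's three separate scans (type pass, count(0)+count(1)==len pass, index-based consecutive-length pass) with one pass that compares each row's length to the first row's and rejects any non-0/1 entry directly.
import Mathlib
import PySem

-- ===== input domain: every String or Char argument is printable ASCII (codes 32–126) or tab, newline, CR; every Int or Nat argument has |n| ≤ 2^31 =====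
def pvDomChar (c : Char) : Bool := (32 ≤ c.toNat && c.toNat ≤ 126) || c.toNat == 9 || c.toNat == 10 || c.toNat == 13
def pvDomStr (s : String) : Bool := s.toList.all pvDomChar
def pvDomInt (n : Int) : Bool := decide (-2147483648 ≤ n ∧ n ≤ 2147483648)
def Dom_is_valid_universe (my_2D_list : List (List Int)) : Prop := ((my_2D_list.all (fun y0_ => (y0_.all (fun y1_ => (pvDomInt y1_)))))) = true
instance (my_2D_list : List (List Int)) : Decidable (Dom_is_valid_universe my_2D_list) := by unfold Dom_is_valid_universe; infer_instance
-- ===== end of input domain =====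

-- B collapses A's three separate scans into one pass comparing each row's length to
-- the first row's and rejecting any non-0/1 entry directly (objective: simpler).

-- ===== PORT A =====
-- first loop of A: `if type(elem) != list: return False` — in this typed port every
-- element IS a list, so the body never fires; kept as a loop that always continues.
def pvA_typeLoop : List (List Int) → Bool
  | [] => true
  | _ :: rest => pvA_typeLoop rest

-- second loop of A: element.count(0) + element.count(1) == len(element)
def pvA_countLoop : List (List Int) → Bool
  | [] => true
  | e :: rest => if (e.count 0 + e.count 1 == e.length) then pvA_countLoop rest else false

-- third loop of A: for i in range(len): break when len==1 or i==len-1,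
-- else compare len(l[i]) with len(l[i+1]); indices are in range where used.
def pvA_rectLoop (l : List (List Int)) (i : Nat) : Bool :=
  if _h : l.length ≤ i then true   -- range exhausted
  else if l.length == 1 || i == l.length - 1 then true  -- break
  else if (l.getD i []).length == (l.getD (i+1) []).length then pvA_rectLoop l (i+1)
  else false
termination_by l.length - i

def is_valid_universe (my_2D_list : List (List Int)) : Bool :=
  if pvA_typeLoop my_2D_list = false then false
  else if my_2D_list.length == 0 then false
  else if pvA_countLoop my_2D_list = false then false
  else pvA_rectLoop my_2D_list 0

-- ===== PORT B =====
-- B's single loop: reject a row whose length differs from the first row's width,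
-- or containing an entry other than 0/1.  (B's `type(row) != list` test never fires
-- in this typed port, like A's first loop.)
def pvB_loop (width : Nat) : List (List Int) → Bool
  | [] => true
  | r :: rest =>
      if r.length != width then false
      else if r.any (fun x => decide (x ≠ 0) && decide (x ≠ 1)) then false
      else pvB_loop width rest

def is_valid_universe_alt (my_2D_list : List (List Int)) : Bool :=
  match my_2D_list with
  | [] => false
  | r :: _ => pvB_loop r.length my_2D_list

-- ===== PRECONDITION & SPEC =====
def Spec_is_valid_universe (my_2D_list : List (List Int)) (out : Bool) : Prop := out = is_valid_universe_alt my_2D_list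
instance (my_2D_list : List (List Int)) (out : Bool) : Decidable (Spec_is_valid_universe my_2D_list out) := by unfold Spec_is_valid_universe; infer_instance

-- ===== CLAIM (what is proved, stated in full; the proofs are below) =====
def Claim_equal_is_valid_universe : Prop := ∀ (my_2D_list : List (List Int)), Dom_is_valid_universe my_2D_list → Spec_is_valid_universe my_2D_list (is_valid_universe my_2D_list)

-- ===== LEMMAS AND PROOFS =====

theorem pvA_typeLoop_true (l : List (List Int)) : pvA_typeLoop l = true := by
  induction l with
  | nil => rfl
  | cons a t ih => simpa [pvA_typeLoop] using ih

theorem pv_countsum_le (e : List Int) : e.count 0 + e.count 1 ≤ e.length := by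
  induction e with
  | nil => simp
  | cons a t ih =>
      simp only [List.count_cons, List.length_cons]
      by_cases h0 : a = 0 <;> by_cases h1 : a = 1 <;> simp_all <;> omega

theorem pv_count_iff (e : List Int) :
    (e.count 0 + e.count 1 = e.length) ↔ ∀ x ∈ e, x = 0 ∨ x = 1 := by
  induction e with
  | nil => simp
  | cons a t ih =>
      have hle := pv_countsum_le t
      simp only [List.count_cons, List.length_cons, List.mem_cons, forall_eq_or_imp]
      by_cases h0 : a = 0 <;> by_cases h1 : a = 1 <;> simp [h0, h1] <;>
        first
        | (rw [← ih]; omega)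
        | omega

theorem pv_bin_all (e : List Int) :
    (e.all (fun x => x == 0 || x == 1) = true) ↔ ∀ x ∈ e, x = 0 ∨ x = 1 := by
  simp [List.all_eq_true]

theorem pvA_countLoop_eq (l : List (List Int)) :
    pvA_countLoop l = l.all (fun e => e.all (fun x => x == 0 || x == 1)) := by
  induction l with
  | nil => rfl
  | cons e t ih =>
      rw [pvA_countLoop, List.all_cons]
      by_cases hc : e.count 0 + e.count 1 = e.length
      · have hb : e.all (fun x => x == 0 || x == 1) = true :=
          (pv_bin_all e).mpr ((pv_count_iff e).mp hc)
        simp [hc, hb, ih]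
      · have hb : e.all (fun x => x == 0 || x == 1) = false := by
          cases hba : e.all (fun x => x == 0 || x == 1) with
          | false => rfl
          | true => exact absurd ((pv_count_iff e).mpr ((pv_bin_all e).mp hba)) hc
        simp [hc, hb]

theorem pvA_rectLoop_eq (l : List (List Int)) (i : Nat) :
    pvA_rectLoop l i =
      decide (∀ j, i ≤ j → j < l.length → (l.getD j []).length = (l.getD i []).length) := by
  rw [pvA_rectLoop]
  split
  · rename_i h
    symm; simp only [decide_eq_true_eq]
    intro j hij hj; omega
  · rename_i h
    push Not at h
    split
    · rename_i h2
      symm; simp only [decide_eq_true_eq]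
      intro j hij hj
      have hji : j = i := by
        rcases (by simpa using h2 : l.length = 1 ∨ i = l.length - 1) with h1 | h1 <;> omega
      rw [hji]
    · rename_i h2
      have hnot : l.length ≠ 1 ∧ i ≠ l.length - 1 := by simpa using h2
      have hi1 : i + 1 < l.length := by omega
      split
      · rename_i h3
        have h3' : (l.getD i []).length = (l.getD (i+1) []).length := by simpa using h3
        rw [pvA_rectLoop_eq l (i+1)]
        symm
        simp only [decide_eq_decide]
        constructor
        · intro hall j hij hj
          exact (hall j (by omega) hj).trans h3'
        · intro hall j hij hj
          rcases Nat.eq_or_lt_of_le hij with he | hlt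
          · rw [← he]
          · exact (hall j (by omega) hj).trans h3'.symm
      · rename_i h3
        symm; simp only [decide_eq_false_iff_not]
        intro hall
        exact h3 (by simpa using (hall (i+1) (by omega) hi1).symm)
termination_by l.length - i

theorem pvB_loop_eq (w : Nat) (rows : List (List Int)) :
    pvB_loop w rows = rows.all (fun r => (r.length == w) && r.all (fun x => x == 0 || x == 1)) := by
  induction rows with
  | nil => rfl
  | cons r t ih =>
      rw [pvB_loop, List.all_cons]
      by_cases hw : r.length = w
      · rw [if_neg (by simp [hw])]
        by_cases ha : r.any (fun x => decide (x ≠ 0) && decide (x ≠ 1)) = true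
        · have hb : r.all (fun x => x == 0 || x == 1) = false := by
            rcases List.any_eq_true.mp ha with ⟨x, hx, hpx⟩
            refine List.all_eq_false.mpr ⟨x, hx, ?_⟩
            simp only [Bool.and_eq_true, decide_eq_true_eq] at hpx
            simp [hpx.1, hpx.2]
          rw [if_pos ha]; simp [hb]
        · have hb : r.all (fun x => x == 0 || x == 1) = true := by
            refine List.all_eq_true.mpr fun x hx => ?_
            have hnx := List.any_eq_false.mp (Bool.eq_false_iff.mpr ha) x hx
            simp only [Bool.and_eq_true, decide_eq_true_eq, not_and] at hnx
            by_cases h0 : x = 0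
            · simp [h0]
            · simp only [beq_iff_eq, Bool.or_eq_true]
              exact Or.inr (by tauto)
          rw [if_neg ha, ih]; simp [hb, hw]
      · rw [if_pos (by simp [bne, hw])]
        simp [hw]

-- ===== VERDICT (by name: the statement is the Claim_ definition above) =====
theorem is_valid_universe_spec : Claim_equal_is_valid_universe := by
  intro l _
  unfold Spec_is_valid_universe
  cases l with
  | nil => rfl
  | cons r t =>
      show is_valid_universe (r :: t) = is_valid_universe_alt (r :: t)
      rw [is_valid_universe, pvA_typeLoop_true]
      simp only [Bool.true_eq_false, if_false, List.length_cons, Nat.succ_ne_zero,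
        beq_iff_eq]
      rw [is_valid_universe_alt, pvB_loop_eq, pvA_countLoop_eq, pvA_rectLoop_eq]
      by_cases hc : ((r :: t).all (fun e => e.all (fun x => x == 0 || x == 1))) = true
      · rw [if_neg (by simp [hc])]
        apply Bool.eq_iff_iff.mpr
        simp only [decide_eq_true_eq, List.all_eq_true, Bool.and_eq_true, beq_iff_eq]
        constructor
        · intro hall x hx
          refine ⟨?_, List.all_eq_true.mp (List.all_eq_true.mp hc x hx) ⟩
          rcases List.mem_iff_getElem.mp hx with ⟨j, hj, rfl⟩
          have := hall j (Nat.zero_le j) hj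
          simpa [List.getD_eq_getElem?_getD, List.getElem?_eq_getElem hj] using this
        · intro hall j _ hj
          have hmem : (r :: t)[j] ∈ (r :: t) := List.getElem_mem hj
          have := (hall _ hmem).1
          simpa [List.getD_eq_getElem?_getD, List.getElem?_eq_getElem hj] using this
      · rw [if_pos (by simpa using hc)]
        symm
        refine List.all_eq_false.mpr ?_
        rcases List.all_eq_false.mp (Bool.eq_false_iff.mpr hc) with ⟨e, he, hef⟩
        exact ⟨e, he, by simp [hef]⟩
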